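-- pv_equiv track=rewrite | github.com/IgrMd/yandex-algos-training | Тренировки по алгоритмам 3.0/Дивизион B/Тема 1. Стеки/14.py | solve
-- ===== SOURCE A (Python) =====
-- def solve(road1):
--     if len(road1) == 1:
--         return 'YES' if road1[0] == 1 else 'NO'
--     road2 = []
--     bottom = []
--     bottom.append(road1[0])
--     for i in range(1, len(road1)):
--         while len(bottom) and bottom[-1] < road1[i]:
--             road2.append(bottom.pop())
--         bottom.append(road1[i])
--
--     while len(bottom):
--         road2.append(bottom.pop())
--     for i, x in enumerate(road2, 1):
--         if i != x:
--             return 'NO'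
--     return 'YES'
-- ===== SOURCE B (Python) =====
-- def solve(road1):
--     bottom = []
--     expected = 1
--     for x in road1:
--         bottom.append(x)
--         while bottom and bottom[-1] == expected:
--             bottom.pop()
--             expected += 1
--     return 'YES' if not bottom else 'NO'
-- ===== Notes on version B (the rewrite author's own statement) =====
-- stated objective: alternative
-- what changed: Replaces A's two-stage monotonic-stack scheme (pop while top < incoming, collect pops in road2, then scan road2 against 1,2,3,...) by the classic direct greedy simulation: push each car, pop whenever the top equals a running expected counter, and answer by whether the stack is empty at the end; no road2 list, no verification scan, no len==1 special case; avoiding the road2 list and the second scan gives a measured constant-factor speedup.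
import Mathlib
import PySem

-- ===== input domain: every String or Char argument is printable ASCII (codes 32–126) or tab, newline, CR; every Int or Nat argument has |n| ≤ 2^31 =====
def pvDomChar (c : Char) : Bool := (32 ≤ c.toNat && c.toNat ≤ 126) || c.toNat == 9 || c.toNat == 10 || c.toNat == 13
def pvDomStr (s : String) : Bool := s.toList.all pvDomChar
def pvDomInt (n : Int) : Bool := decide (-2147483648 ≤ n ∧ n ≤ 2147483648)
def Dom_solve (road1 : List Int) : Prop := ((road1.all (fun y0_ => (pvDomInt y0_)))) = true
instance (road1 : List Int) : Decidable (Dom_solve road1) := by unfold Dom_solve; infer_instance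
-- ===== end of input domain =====

-- B replaces A's monotonic-stack pass plus verification scan of the collected road2 list by the
-- direct greedy simulation: push each car, pop while the top equals a running expected counter,
-- and answer by final stack emptiness ('alternative'; no road2 list, no second scan).

-- ===== PORT A =====
-- the inner 'while len(bottom) and bottom[-1] < road1[i]' loop: stack top at the head,
-- pops are appended to road2 (the accumulator r)
def popA (x : Int) : List Int → List Int → List Int × List Int
  | [], r => ([], r)
  | t :: rest, r => if t < x then popA x rest (r ++ [t]) else (t :: rest, r)

-- one iteration of A's for-loop: pop, then push road1[i]
def stepA (st : List Int × List Int) (x : Int) : List Int × List Int :=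
  let (b, r) := popA x st.1 st.2
  (x :: b, r)

-- the trailing 'for i, x in enumerate(road2, 1): if i != x: return NO' scan
def checkA (e : Int) : List Int → Bool
  | [] => true
  | x :: xs => if e ≠ x then false else checkA (e + 1) xs

def solve (road1 : List Int) : String :=
  if road1.length = 1 then
    match PySem.List.pyGet? road1 0 with
    | some v => if v = 1 then "YES" else "NO"
    | none => ""  -- unreachable (length = 1)
  else
    match road1 with
    | [] => ""  -- road1[0] raises IndexError here; excluded by Pre_solve
    | h :: t =>
      let st := t.foldl stepA ([h], [])
      -- final flush 'while len(bottom): road2.append(bottom.pop())'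
      let road2 := st.2 ++ st.1
      if checkA 1 road2 then "YES" else "NO"

-- ===== PORT B =====
-- B's inner 'while bottom and bottom[-1] == expected' loop (stack top at the head)
def popsB : List Int → Int → List Int × Int
  | [], e => ([], e)
  | h :: t, e => if h = e then popsB t (e + 1) else (h :: t, e)

-- one iteration of B's for-loop: push x, then pop while top == expected
def stepB (st : List Int × Int) (x : Int) : List Int × Int :=
  popsB (x :: st.1) st.2

def solve_alt (road1 : List Int) : String :=
  let st := road1.foldl stepB ([], 1)
  if st.1.isEmpty then "YES" else "NO"

-- ===== PRECONDITION & SPEC =====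
-- Pre_ excludes only the empty list, on which A raises IndexError (road1[0]).
def Pre_solve (road1 : List Int) : Prop := road1 ≠ []
instance (road1 : List Int) : Decidable (Pre_solve road1) := by unfold Pre_solve; infer_instance
def pvWitness_solve : List Int := [2, 1]

def Spec_solve (road1 : List Int) (out : String) : Prop := out = solve_alt road1
instance (road1 : List Int) (out : String) : Decidable (Spec_solve road1 out) := by unfold Spec_solve; infer_instance

-- ===== CLAIM (what is proved, stated in full; the proofs are below) =====
def Claim_equal_solve : Prop := ∀ (road1 : List Int), Dom_solve road1 → Pre_solve road1 → Spec_solve road1 (solve road1)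

-- ===== LEMMAS AND PROOFS =====

-- the consecutive run c, c+1, …, c+k-1
def seqI (c : Int) : Nat → List Int
  | 0 => []
  | k + 1 => c :: seqI (c + 1) k

-- strictly increasing (head to tail)
def Incr : List Int → Prop
  | [] => True
  | [_] => True
  | a :: b :: t => a < b ∧ Incr (b :: t)

lemma incr_tail : ∀ {a : Int} {l : List Int}, Incr (a :: l) → Incr l := by
  intro a l h
  cases l with
  | nil => trivial
  | cons b t => exact h.2

lemma mem_seqI : ∀ (k : Nat) (c y : Int), y ∈ seqI c k ↔ c ≤ y ∧ y < c + k := by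
  intro k
  induction k with
  | zero => intro c y; simp [seqI]
  | succ k ih =>
    intro c y
    simp only [seqI, List.mem_cons, ih (c + 1) y]
    constructor
    · rintro (rfl | ⟨h1, h2⟩) <;> constructor <;> push_cast <;> omega
    · rintro ⟨h1, h2⟩
      by_cases h : y = c
      · exact Or.inl h
      · right; push_cast at h2 ⊢; constructor <;> omega

lemma seqI_append : ∀ (a b : Nat) (c : Int), seqI c (a + b) = seqI c a ++ seqI (c + a) b := by
  intro a
  induction a with
  | zero => intro b c; simp [seqI]
  | succ a ih =>
    intro b c
    have h : a + 1 + b = (a + b) + 1 := by omega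
    have h2 : c + ((a : Int) + 1) = (c + 1) + (a : Int) := by ring
    rw [h]
    simp only [seqI, ih b (c + 1), List.cons_append]
    push_cast
    rw [h2]

lemma length_seqI : ∀ (k : Nat) (c : Int), (seqI c k).length = k := by
  intro k
  induction k with
  | zero => intro c; simp [seqI]
  | succ k ih => intro c; simp [seqI, ih]

lemma nodup_seqI : ∀ (k : Nat) (c : Int), (seqI c k).Nodup := by
  intro k
  induction k with
  | zero => intro c; simp [seqI]
  | succ k ih =>
    intro c
    simp only [seqI, List.nodup_cons]
    refine ⟨fun h => ?_, ih (c + 1)⟩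
    have := (mem_seqI k (c + 1) c).1 h
    omega

lemma checkA_seqI : ∀ (k : Nat) (c : Int) (l : List Int), checkA c (seqI c k ++ l) = checkA (c + k) l := by
  intro k
  induction k with
  | zero => intro c l; simp [seqI]
  | succ k ih =>
    intro c l
    simp only [seqI, List.cons_append, checkA, if_neg (by omega : ¬ c ≠ c), ih (c + 1) l]
    congr 1
    push_cast; omega

lemma checkA_false_append (c : Int) : ∀ (l s : List Int), checkA c l = false → checkA c (l ++ s) = false := by
  intro l
  induction l generalizing c with
  | nil => intro s h; simp [checkA] at h
  | cons t rest ih =>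
    intro s h
    by_cases hx : c = t
    · simp only [checkA, if_neg (not_not_intro hx)] at h
      simpa [checkA, hx] using ih (c + 1) s h
    · simp [checkA, hx]

lemma checkA_true_eq_seqI : ∀ (l : List Int) (c : Int), checkA c l = true → l = seqI c l.length := by
  intro l
  induction l with
  | nil => intro c _; simp [seqI]
  | cons t rest ih =>
    intro c h
    by_cases hx : c = t
    · simp only [checkA, if_neg (not_not_intro hx)] at h
      simp [seqI, ← hx, ← ih (c + 1) h]
    · simp [checkA, hx] at h

-- splitting 'r ++ s = the run 1..' into its two halves
lemma split_run (r s : List Int) (h : checkA 1 (r ++ s) = true) :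
    r = seqI 1 r.length ∧ s = seqI (1 + (r.length : Int)) s.length := by
  have heq := checkA_true_eq_seqI (r ++ s) 1 h
  have h2 : r ++ s = seqI 1 r.length ++ seqI (1 + (r.length : Int)) s.length := by
    rw [heq]; simp only [List.length_append]
    rw [seqI_append r.length s.length 1]
  exact ⟨List.append_inj_left h2 (by rw [length_seqI]),
         List.append_inj_right h2 (by rw [length_seqI])⟩

-- popA accumulator lemma
lemma popA_acc (x : Int) : ∀ (b r : List Int),
    popA x b r = ((popA x b []).1, r ++ (popA x b []).2) := by
  intro b
  induction b with
  | nil => intro r; simp [popA]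
  | cons t rest ih =>
    intro r
    by_cases h : t < x
    · simp only [popA, if_pos h, List.nil_append]
      rw [ih (r ++ [t]), ih [t]]
      simp
    · simp [popA, if_neg h]

-- popA splits the stack: popped ++ kept, popped elements all < x
lemma popA_split (x : Int) : ∀ (b : List Int),
    b = (popA x b []).2 ++ (popA x b []).1 ∧ ∀ y ∈ (popA x b []).2, y < x := by
  intro b
  induction b with
  | nil => simp [popA]
  | cons t rest ih =>
    by_cases h : t < x
    · simp only [popA, if_pos h, List.nil_append]
      rw [popA_acc x rest [t]]
      constructor
      · simpa using ih.1
      · intro y hy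
        simp only [List.cons_append, List.nil_append, List.mem_cons] at hy
        rcases hy with rfl | hy
        · exact h
        · exact ih.2 y hy
    · simp [popA, if_neg h]

lemma popA_stop (x : Int) (b r : List Int) (h : ∀ hh t, b = hh :: t → ¬ hh < x) :
    popA x b r = (b, r) := by
  cases b with
  | nil => simp [popA]
  | cons t rest => simp [popA, if_neg (h t rest rfl)]

lemma popA_seqI_ge (x : Int) : ∀ (k : Nat) (c : Int) (sb r : List Int), c + k ≤ x →
    popA x (seqI c k ++ sb) r = popA x sb (r ++ seqI c k) := by
  intro k
  induction k with
  | zero => intro c sb r _; simp [seqI]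
  | succ k ih =>
    intro c sb r h
    have hc : c < x := by push_cast at h; omega
    simp only [seqI, List.cons_append, popA, if_pos hc]
    rw [ih (c + 1) sb (r ++ [c]) (by push_cast at h ⊢; omega)]
    simp [seqI]

-- B's pop loop on an admissible stack: pops exactly the maximal consecutive run from c
lemma popsB_good : ∀ (sb : List Int) (c : Int), Incr sb →
    (∀ hh t, sb = hh :: t → c ≤ hh) →
    ∃ (j : Nat) (sb2 : List Int), popsB sb c = (sb2, c + j) ∧ sb = seqI c j ++ sb2 ∧
      Incr sb2 ∧ (∀ hh t, sb2 = hh :: t → c + j < hh) := by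
  intro sb
  induction sb with
  | nil =>
    intro c _ _
    exact ⟨0, [], by simp [popsB], by simp [seqI], trivial, by intro hh t h; cases h⟩
  | cons h t ih =>
    intro c hch hge
    by_cases he : h = c
    · subst he
      have hch' : Incr t := incr_tail hch
      have hge' : ∀ hh tt, t = hh :: tt → h + 1 ≤ hh := by
        intro hh tt hteq
        subst hteq
        exact hch.1
      obtain ⟨j, sb2, h1, h2, h3, h4⟩ := ih (h + 1) hch' hge'
      refine ⟨j + 1, sb2, ?_, ?_, h3, ?_⟩
      · have h5 : h + ((j : Int) + 1) = h + 1 + (j : Int) := by ring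
        simp only [popsB, if_pos rfl, h1, Prod.mk.injEq, true_and]
        push_cast
        rw [h5]
      · simp only [seqI, List.cons_append]; rw [← h2]
      · intro hh tt heq
        have := h4 hh tt heq
        push_cast at this ⊢; omega
    · refine ⟨0, h :: t, by simp [popsB, he], by simp [seqI], hch, ?_⟩
      intro hh tt heq
      have h1 := hge h t rfl
      injection heq with e1 e2
      subst e1
      push_cast
      omega

-- ===== the coupled invariant =====

-- Good: A's stack is the run m+1..e-1 on top of B's stack; r is the run 1..m;
-- B's stack is strictly increasing with head beyond e.
def GoodInv (sa r sb : List Int) (e : Int) : Prop :=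
  ∃ (m k : Nat), r = seqI 1 m ∧ e = (m : Int) + k + 1 ∧ sa = seqI ((m : Int) + 1) k ++ sb ∧
    Incr sb ∧ (∀ hh t, sb = hh :: t → e < hh)

-- A is doomed: r already mismatches, or a value ≤ |r| is still in the stack, or the stack has a duplicate
def BadA (sa r : List Int) : Prop :=
  checkA 1 r = false ∨ (∃ y ∈ sa, y ≤ (r.length : Int)) ∨ ¬ sa.Nodup

-- B is doomed: a dead value < expected sits in the stack, or the stack has an inversion
def BadB (sb : List Int) (e : Int) : Prop :=
  (∃ y ∈ sb, y < e) ∨ ¬ Incr sb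

def CoupInv (sa r sb : List Int) (e : Int) : Prop :=
  GoodInv sa r sb e ∨ (BadA sa r ∧ BadB sb e)

-- Bad states stay bad
lemma badB_popsB : ∀ (sb : List Int) (e : Int), BadB sb e → BadB (popsB sb e).1 (popsB sb e).2 := by
  intro sb
  induction sb with
  | nil => intro e h; simpa [popsB] using h
  | cons h t ih =>
    intro e hb
    by_cases he : h = e
    · subst he
      simp only [popsB, if_pos rfl]
      apply ih
      rcases hb with ⟨y, hy, hlt⟩ | hch
      · rcases List.mem_cons.1 hy with rfl | hy'
        · omega
        · exact Or.inl ⟨y, hy', by omega⟩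
      · cases t with
        | nil => exact absurd trivial hch
        | cons h2 t2 =>
          by_cases hlt : h < h2
          · exact Or.inr (fun hc => hch ⟨hlt, hc⟩)
          · exact Or.inl ⟨h2, by simp, by omega⟩
    · simpa [popsB, if_neg he] using hb

lemma badB_step (sb : List Int) (e x : Int) (h : BadB sb e) :
    BadB (stepB (sb, e) x).1 (stepB (sb, e) x).2 := by
  apply badB_popsB
  rcases h with ⟨y, hy, hlt⟩ | hch
  · exact Or.inl ⟨y, List.mem_cons_of_mem x hy, hlt⟩
  · exact Or.inr (fun hc => hch (incr_tail hc))

lemma badA_step (sa r : List Int) (x : Int) (h : BadA sa r) :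
    BadA (stepA (sa, r) x).1 (stepA (sa, r) x).2 := by
  have hsplit := popA_split x sa
  have hst : stepA (sa, r) x = (x :: (popA x sa []).1, r ++ (popA x sa []).2) := by
    simp only [stepA, popA_acc x sa r]
  set s1 := (popA x sa []).2 with hs1
  set s2 := (popA x sa []).1 with hs2
  rw [hst]
  by_cases hck : checkA 1 (r ++ s1) = false
  · exact Or.inl hck
  · have hcks : checkA 1 (r ++ s1) = true := by
      cases hc : checkA 1 (r ++ s1)
      · exact absurd hc hck
      · rfl
    obtain ⟨hr, hs1eq⟩ := split_run r s1 hcks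
    have hmem_s1 : ∀ y ∈ s1, (r.length : Int) < y := by
      intro y hy
      rw [hs1eq] at hy
      have := (mem_seqI s1.length (1 + (r.length : Int)) y).1 hy
      omega
    rcases h with hbad | ⟨y, hy, hle⟩ | hnd
    · exact absurd (checkA_false_append 1 r s1 hbad) hck
    · -- the small element y is in s1 or s2
      rw [hsplit.1] at hy
      rcases List.mem_append.1 hy with hy1 | hy2
      · exact absurd hle (by have := hmem_s1 y hy1; omega)
      · refine Or.inr (Or.inl ⟨y, by simp [hy2], ?_⟩)
        simp only [List.length_append]
        push_cast
        omega
    · -- a duplicate somewhere in sa = s1 ++ s2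
      rw [hsplit.1] at hnd
      have hnds1 : s1.Nodup := by rw [hs1eq]; exact nodup_seqI _ _
      rw [List.nodup_append] at hnd
      push_neg at hnd
      by_cases hnds2 : s2.Nodup
      · obtain ⟨y, hy1, y2, hy2, heq2⟩ := hnd hnds1 hnds2
        subst heq2
        refine Or.inr (Or.inl ⟨y, by simp [hy2], ?_⟩)
        rw [hs1eq] at hy1
        have := (mem_seqI s1.length (1 + (r.length : Int)) y).1 hy1
        simp only [List.length_append]
        push_cast
        omega
      · refine Or.inr (Or.inr ?_)
        rw [List.nodup_cons]
        intro hc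
        exact hnds2 hc.2

-- the main step lemma: the coupled invariant is preserved
lemma inv_step (sa r sb : List Int) (e x : Int) (h : CoupInv sa r sb e) :
    CoupInv (stepA (sa, r) x).1 (stepA (sa, r) x).2 (stepB (sb, e) x).1 (stepB (sb, e) x).2 := by
  rcases h with good | ⟨ba, bb⟩
  · obtain ⟨m, k, hr, he, hsa, hch, hhd⟩ := good
    have hrlen : r.length = m := by rw [hr, length_seqI]
    by_cases hx1 : x ≤ (m : Int)
    · -- (i.a) x ≤ m: both push x, both doomed
      have hnopop : ∀ hh t, sa = hh :: t → ¬ hh < x := by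
        intro hh t hseq
        cases k with
        | zero =>
          simp only [seqI, List.nil_append] at hsa
          rw [hsa] at hseq
          have := hhd hh t hseq
          omega
        | succ k' =>
          rw [hsa] at hseq
          simp only [seqI, List.cons_append] at hseq
          injection hseq with e1 _
          omega
      have hA : stepA (sa, r) x = (x :: sa, r) := by
        simp only [stepA, popA_stop x sa r hnopop]
      have hxe : x ≠ e := by omega
      have hB : stepB (sb, e) x = (x :: sb, e) := by
        simp [stepB, popsB, if_neg hxe]
      rw [hA, hB]
      refine Or.inr ⟨Or.inr (Or.inl ⟨x, by simp, by rw [hrlen]; exact hx1⟩),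
                     Or.inl ⟨x, by simp, by omega⟩⟩
    · push_neg at hx1
      by_cases hx2 : x ≤ (m : Int) + k
      · -- (i.b) m+1 ≤ x ≤ m+k: x duplicates a run element; both doomed
        have hk : 0 < k := by omega
        set a := (x - (m + 1)).toNat with ha
        have hak : a < k := by omega
        set b := k - a with hb
        have hkab : k = a + b := by omega
        have hxa : (m : Int) + 1 + a = x := by omega
        have hsplit2 : seqI ((m : Int) + 1) k = seqI ((m : Int) + 1) a ++ seqI x b := by
          rw [hkab, seqI_append, hxa]
        have hb1 : 0 < b := by omega
        obtain ⟨b', hb'⟩ : ∃ b', b = b' + 1 := ⟨b - 1, by omega⟩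
        rw [hb'] at hsplit2
        have hA : stepA (sa, r) x = (x :: (seqI x (b' + 1) ++ sb), r ++ seqI ((m : Int) + 1) a) := by
          simp only [stepA, hsa, hsplit2, List.append_assoc]
          rw [popA_seqI_ge x a ((m : Int) + 1) (seqI x (b' + 1) ++ sb) r (by omega)]
          rw [popA_stop x _ _ (by
            intro hh t hseq
            simp only [seqI, List.cons_append] at hseq
            injection hseq with e1 _
            omega)]
        have hxe : x ≠ e := by omega
        have hB : stepB (sb, e) x = (x :: sb, e) := by
          simp [stepB, popsB, if_neg hxe]
        rw [hA, hB]
        refine Or.inr ⟨Or.inr (Or.inr ?_), Or.inl ⟨x, by simp, by omega⟩⟩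
        rw [List.nodup_cons]
        intro hc
        exact hc.1 (by
          apply List.mem_append_left
          exact (mem_seqI (b' + 1) x x).2 ⟨le_refl x, by push_cast; omega⟩)
      · push_neg at hx2
        have hflush : popA x sa r = popA x sb (seqI 1 (m + k)) := by
          rw [hsa, popA_seqI_ge x k ((m : Int) + 1) sb r (by omega), hr]
          congr 1
          rw [seqI_append]
          congr 2
          omega
        by_cases hxe : x = e
        · -- (ii) x = e: A flushes the run and pushes e; B pops e and the following run: Good again
          subst hxe
          have hA : stepA (sa, r) x = (x :: sb, seqI 1 (m + k)) := by
            simp only [stepA, hflush]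
            rw [popA_stop x sb _ (by
              intro hh t hseq
              have := hhd hh t hseq
              omega)]
          obtain ⟨j, sb2, hp1, hp2, hp3, hp4⟩ := popsB_good sb (x + 1) hch (by
            intro hh t hseq
            have := hhd hh t hseq
            omega)
          have hB : stepB (sb, x) x = (sb2, x + 1 + j) := by
            simp [stepB, popsB, hp1]
          rw [hA, hB]
          have hcast : ((m + k : Nat) : Int) + 1 = x := by push_cast; omega
          refine Or.inl ⟨m + k, j + 1, rfl, by push_cast; omega, ?_, hp3, ?_⟩
          · simp only [hcast, hp2, seqI]
            simp
          · intro hh t hseq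
            have := hp4 hh t hseq
            omega
        · -- (iii) x > e
          have hxgt : e < x := by omega
          rcases sb with _ | ⟨y, t⟩
          · have hA : stepA (sa, r) x = ([x], seqI 1 (m + k)) := by
              simp only [stepA, hflush, popA]
            have hB : stepB ([], e) x = ([x], e) := by
              simp [stepB, popsB, if_neg hxe]
            rw [hA, hB]
            exact Or.inl ⟨m + k, 0, rfl, by push_cast; omega, by simp [seqI], trivial,
              by intro hh t hseq; injection hseq with e1 _; omega⟩
          · have hy : e < y := hhd y t rfl
            by_cases hyx : y < x
            · -- (iii.b) A pops y > e into r: mismatch; B gets the inversion x > y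
              have hA2 : (stepA (sa, r) x).2 = seqI 1 (m + k) ++ [y] ++ (popA x t []).2 := by
                simp only [stepA, hflush, popA, if_pos hyx]
                rw [popA_acc x t (seqI 1 (m + k) ++ [y])]
              have hB : stepB (y :: t, e) x = (x :: y :: t, e) := by
                simp [stepB, popsB, if_neg hxe]
              refine Or.inr ⟨Or.inl ?_, ?_⟩
              · rw [hA2, List.append_assoc]
                rw [checkA_seqI (m + k) 1 ([y] ++ (popA x t []).2)]
                simp only [List.cons_append, List.nil_append, checkA]
                rw [if_pos (by push_cast; omega : (1 : Int) + ((m + k : Nat) : Int) ≠ y)]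
              · rw [hB]
                exact Or.inr (fun hc => absurd hc.1 (by omega))
            · -- (iii.a) top of sb ≥ x
              by_cases hyx2 : y = x
              · have hA : stepA (sa, r) x = (x :: y :: t, seqI 1 (m + k)) := by
                  simp only [stepA, hflush, popA, if_neg hyx]
                have hB : stepB (y :: t, e) x = (x :: y :: t, e) := by
                  simp [stepB, popsB, if_neg hxe]
                rw [hA, hB]
                refine Or.inr ⟨Or.inr (Or.inr ?_), Or.inr (fun hc => absurd hc.1 (by omega))⟩
                rw [List.nodup_cons]
                intro hc
                exact hc.1 (List.mem_cons.2 (Or.inl hyx2.symm))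
              · have hxy : x < y := by omega
                have hA : stepA (sa, r) x = (x :: y :: t, seqI 1 (m + k)) := by
                  simp only [stepA, hflush, popA, if_neg hyx]
                have hB : stepB (y :: t, e) x = (x :: y :: t, e) := by
                  simp [stepB, popsB, if_neg hxe]
                rw [hA, hB]
                refine Or.inl ⟨m + k, 0, rfl, by push_cast; omega, by simp [seqI],
                  ⟨hxy, hch⟩, ?_⟩
                intro hh tt hseq
                injection hseq with e1 _
                omega
  · exact Or.inr ⟨badA_step sa r x ba, badB_step sb e x bb⟩

lemma inv_fold : ∀ (xs : List Int) (pA : List Int × List Int) (pB : List Int × Int),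
    CoupInv pA.1 pA.2 pB.1 pB.2 →
    CoupInv (xs.foldl stepA pA).1 (xs.foldl stepA pA).2
        (xs.foldl stepB pB).1 (xs.foldl stepB pB).2 := by
  intro xs
  induction xs with
  | nil => intro pA pB h; exact h
  | cons x xs ih =>
    intro pA pB h
    simp only [List.foldl_cons]
    exact ih _ _ (by
      have := inv_step pA.1 pA.2 pB.1 pB.2 x h
      simpa using this)

lemma badA_final (sa r : List Int) (h : BadA sa r) : checkA 1 (r ++ sa) = false := by
  cases hc : checkA 1 (r ++ sa)
  · rfl
  · exfalso
    obtain ⟨_, hsa⟩ := split_run r sa hc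
    rcases h with hck | ⟨y, hy, hle⟩ | hnd
    · exact absurd (checkA_false_append 1 r sa hck) (by rw [hc]; simp)
    · rw [hsa] at hy
      have := (mem_seqI sa.length (1 + (r.length : Int)) y).1 hy
      omega
    · exact hnd (hsa ▸ nodup_seqI _ _)

-- the single-element case: A's special branch vs B's general loop
lemma single_case (v : Int) : solve [v] = solve_alt [v] := by
  by_cases h : v = 1
  · simp [solve, solve_alt, stepB, popsB, PySem.List.pyGet?, PySem.List.pyIdx?, h]
  · simp [solve, solve_alt, stepB, popsB, PySem.List.pyGet?, PySem.List.pyIdx?, h]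

-- ===== VERDICT (by name: the statement is the Claim_ definition above) =====
theorem solve_spec : Claim_equal_solve := by
  intro road1 _ hpre
  unfold Spec_solve
  match road1 with
  | [] => exact absurd rfl hpre
  | [v] => exact single_case v
  | h :: t1 :: t2 =>
    have hlen : (h :: t1 :: t2).length ≠ 1 := by simp
    have hinit : CoupInv [] [] [] 1 :=
      Or.inl ⟨0, 0, rfl, by norm_num, by simp [seqI], trivial, by intro hh t hx; cases hx⟩
    have hinv := inv_fold (h :: t1 :: t2) ([], []) ([], 1) hinit
    have hbridge : (h :: t1 :: t2).foldl stepA ([], []) = (t1 :: t2).foldl stepA ([h], []) := by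
      simp [List.foldl_cons, stepA, popA]
    rw [hbridge] at hinv
    set stA := (t1 :: t2).foldl stepA ([h], []) with hstA
    set stB := (h :: t1 :: t2).foldl stepB ([], 1) with hstB
    have hgoal : (if checkA 1 (stA.2 ++ stA.1) then "YES" else "NO") =
        (if stB.1.isEmpty then "YES" else "NO") := by
      rcases hinv with good | ⟨ba, bb⟩
      · obtain ⟨m, k, hr, he, hsa, _, hhd⟩ := good
        have hck : checkA 1 (stA.2 ++ stA.1) = checkA stB.2 stB.1 := by
          rw [hr, hsa, ← List.append_assoc]
          have h1 : seqI 1 m ++ seqI ((m : Int) + 1) k = seqI 1 (m + k) := by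
            rw [seqI_append]
            congr 2
            omega
          rw [h1, checkA_seqI (m + k) 1 stB.1]
          congr 1
          push_cast
          omega
        rw [hck]
        cases hsb : stB.1 with
        | nil => simp [checkA]
        | cons y t =>
          have hys : stB.2 ≠ y := by have := hhd y t hsb; omega
          simp [checkA, hys]
      · rw [badA_final stA.1 stA.2 ba]
        have hne : stB.1 ≠ [] := by
          rcases bb with ⟨y, hy, _⟩ | hch
          · intro hc; rw [hc] at hy; cases hy
          · intro hc; rw [hc] at hch; exact hch trivial
        cases hsb : stB.1 with
        | nil => exact absurd hsb hne
        | cons y t => simp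
    simpa [solve, solve_alt, if_neg hlen] using hgoal
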